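-- pv_equiv track=rewrite | github.com/sean-tse/2020-ANZAC-1 | K_truth.py | max_truth
-- ===== SOURCE A (Python) =====
-- def max_truth(pairs, n):
--
--     for i in range(n, 0, -1):
--         count = 0
--         for j in range(len(pairs)):
--             if pairs[j][0] <= i <= pairs[j][1]:
--                 count += 1
--         if i == count:
--             return i
--
--     return -1
-- ===== SOURCE B (Python) =====
-- def max_truth(pairs, n):
--     # difference map + prefix sums; the answer can never exceed len(pairs),
--     # so only i in [1, min(n, len(pairs))] needs checking.
--     m = min(n, len(pairs))
--     diff = {}
--     for a, b in pairs:
--         lo = max(a, 1)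
--         if lo <= b:
--             diff[lo] = diff.get(lo, 0) + 1
--             diff[b + 1] = diff.get(b + 1, 0) - 1
--     best = -1
--     cnt = 0
--     for i in range(1, m + 1):
--         cnt += diff.get(i, 0)
--         if cnt == i:
--             best = i
--     return best
-- ===== Notes on version B (the rewrite author's own statement) =====
-- stated objective: faster
-- what changed: Replaces the per-candidate rescan of all intervals (for each i from n down, count covering intervals) by a difference map + one prefix-sum sweep, and checks only i up to min(n, len(pairs)) since a count can never exceed len(pairs).
import Mathlib
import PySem

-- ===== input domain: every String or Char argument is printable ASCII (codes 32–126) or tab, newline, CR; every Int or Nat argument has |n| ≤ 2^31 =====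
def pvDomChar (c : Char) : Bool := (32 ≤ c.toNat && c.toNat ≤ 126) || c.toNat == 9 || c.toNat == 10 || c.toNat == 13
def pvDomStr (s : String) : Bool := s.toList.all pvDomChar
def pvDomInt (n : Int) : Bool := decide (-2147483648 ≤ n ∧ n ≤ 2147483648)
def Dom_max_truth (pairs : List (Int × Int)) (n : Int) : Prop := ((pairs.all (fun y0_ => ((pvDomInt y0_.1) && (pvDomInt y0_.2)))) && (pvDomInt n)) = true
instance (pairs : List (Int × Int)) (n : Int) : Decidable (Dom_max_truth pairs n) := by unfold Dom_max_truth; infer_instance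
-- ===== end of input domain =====

-- B replaces A's per-candidate rescan of all intervals by a difference map plus one
-- prefix-sum sweep over i ≤ min(n, len(pairs)); same return value everywhere.

-- ===== PORT A =====
-- inner loop: count = number of j with pairs[j][0] <= i <= pairs[j][1]
def maxTruthCount (pairs : List (Int × Int)) (i : Int) : Int :=
  (PySem.List.pyRange 0 (pairs.length : Int) 1).foldl
    (fun count j =>
      let p := PySem.List.pyGetD pairs j ((0 : Int), (0 : Int))
      if p.1 ≤ i ∧ i ≤ p.2 then count + 1 else count) 0

-- outer loop over range(n, 0, -1) with early return
def maxTruthLoop (pairs : List (Int × Int)) : List Int → Int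
  | [] => -1
  | i :: rest => if maxTruthCount pairs i = i then i else maxTruthLoop pairs rest

def max_truth (pairs : List (Int × Int)) (n : Int) : Int :=
  maxTruthLoop pairs (PySem.List.pyRange n 0 (-1))

-- ===== PORT B =====
-- diff[lo] += 1; diff[b+1] -= 1 (only for intervals meeting [1, ∞))
def altStep (d : PySem.Dict Int Int) (p : Int × Int) : PySem.Dict Int Int :=
  let lo := max p.1 1
  if lo ≤ p.2 then
    let d1 := d.insert lo (d.getD lo 0 + 1)
    d1.insert (p.2 + 1) (d1.getD (p.2 + 1) 0 - 1)
  else d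

def altDiff (pairs : List (Int × Int)) : PySem.Dict Int Int :=
  pairs.foldl altStep PySem.Dict.empty

-- one step of the prefix-sum sweep: state = (cnt, best)
def altScan (diff : PySem.Dict Int Int) (s : Int × Int) (i : Int) : Int × Int :=
  let cnt := s.1 + diff.getD i 0
  (cnt, if cnt = i then i else s.2)

def max_truth_alt (pairs : List (Int × Int)) (n : Int) : Int :=
  let m := min n (pairs.length : Int)
  ((PySem.List.pyRange 1 (m + 1) 1).foldl (altScan (altDiff pairs)) (0, -1)).2

-- ===== PRECONDITION & SPEC =====
def Spec_max_truth (pairs : List (Int × Int)) (n : Int) (out : Int) : Prop := out = max_truth_alt pairs n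
instance (pairs : List (Int × Int)) (n : Int) (out : Int) : Decidable (Spec_max_truth pairs n out) := by unfold Spec_max_truth; infer_instance

-- ===== CLAIM (what is proved, stated in full; the proofs are below) =====
def Claim_equal_max_truth : Prop := ∀ (pairs : List (Int × Int)) (n : Int), Dom_max_truth pairs n → Spec_max_truth pairs n (max_truth pairs n)

-- ===== LEMMAS AND PROOFS =====

-- clamped coverage count: number of intervals with max(lo,1) ≤ i ≤ hi
def pvF (pairs : List (Int × Int)) (i : Int) : Int :=
  (pairs.countP (fun p => decide (max p.1 1 ≤ i ∧ i ≤ p.2)) : Int)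

-- reference scan from the top: first k in [1..k0] with pvF k = k, else -1
def pvScanT (pairs : List (Int × Int)) : Nat → Int
  | 0 => -1
  | Nat.succ k =>
      if pvF pairs ((k : Int) + 1) = (k : Int) + 1 then (k : Int) + 1 else pvScanT pairs k

theorem pvF_cons (p : Int × Int) (ps : List (Int × Int)) (i : Int) :
    pvF (p :: ps) i = pvF ps i + (if max p.1 1 ≤ i ∧ i ≤ p.2 then 1 else 0) := by
  simp [pvF, List.countP_cons]

theorem pvF_zero (pairs : List (Int × Int)) : pvF pairs 0 = 0 := by
  induction pairs with
  | nil => simp [pvF]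
  | cons p ps ih => rw [pvF_cons, ih]; split_ifs with h <;> omega

theorem pvF_le_len (pairs : List (Int × Int)) (i : Int) : pvF pairs i ≤ (pairs.length : Int) := by
  unfold pvF; exact_mod_cast List.countP_le_length

theorem foldl_count_eq (P : Int × Int → Prop) [DecidablePred P] :
    ∀ (l : List (Int × Int)) (c : Int),
      l.foldl (fun c p => if P p then c + 1 else c) c = c + (l.countP (fun p => decide (P p)) : Int) := by
  intro l
  induction l with
  | nil => intro c; simp
  | cons p ps ih =>
      intro c
      simp only [List.foldl_cons, List.countP_cons, ih]
      by_cases h : P p <;> simp [h] <;> push_cast <;> omega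

theorem count_eq_pvF (pairs : List (Int × Int)) (i : Int) (hi : 1 ≤ i) :
    maxTruthCount pairs i = pvF pairs i := by
  unfold maxTruthCount
  rw [PySem.List.foldl_pyRange_zero_pyGetD' pairs ((0 : Int), (0 : Int))
        (fun count p => if p.1 ≤ i ∧ i ≤ p.2 then count + 1 else count) 0]
  rw [foldl_count_eq (fun p : Int × Int => p.1 ≤ i ∧ i ≤ p.2) pairs 0]
  unfold pvF
  have : pairs.countP (fun p => decide (p.1 ≤ i ∧ i ≤ p.2))
       = pairs.countP (fun p => decide (max p.1 1 ≤ i ∧ i ≤ p.2)) := by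
    apply List.countP_congr
    intro p _
    simp only [decide_eq_true_eq]
    exact ⟨fun h => ⟨by omega, h.2⟩, fun h => ⟨by omega, h.2⟩⟩
  rw [this]
  omega

theorem altStep_getD (d : PySem.Dict Int Int) (p : Int × Int) (i : Int) :
    (altStep d p).getD i 0 =
      d.getD i 0 + (if max p.1 1 ≤ i ∧ i ≤ p.2 then 1 else 0)
        - (if max p.1 1 ≤ i - 1 ∧ i - 1 ≤ p.2 then 1 else 0) := by
  unfold altStep
  by_cases hg : max p.1 1 ≤ p.2
  · simp only [if_pos hg, PySem.Dict.getD_insert]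
    split_ifs <;> (try subst_vars) <;> omega
  · simp only [if_neg hg]
    split_ifs <;> omega

theorem diff_getD (pairs : List (Int × Int)) :
    ∀ (d : PySem.Dict Int Int) (i : Int),
      (pairs.foldl altStep d).getD i 0 = d.getD i 0 + pvF pairs i - pvF pairs (i - 1) := by
  induction pairs with
  | nil => intro d i; simp [pvF]
  | cons p ps ih =>
      intro d i
      simp only [List.foldl_cons, ih, pvF_cons, altStep_getD]
      omega

theorem altDiff_getD (pairs : List (Int × Int)) (i : Int) :
    (altDiff pairs).getD i 0 = pvF pairs i - pvF pairs (i - 1) := by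
  unfold altDiff
  rw [diff_getD]
  simp [PySem.Dict.empty, PySem.Dict.getD, PySem.Dict.get?]

theorem loopA_eq_scanT (pairs : List (Int × Int)) :
    ∀ (k : Nat) (n : Int), n.toNat = k →
      maxTruthLoop pairs (PySem.List.pyRange n 0 (-1)) = pvScanT pairs k := by
  intro k
  induction k with
  | zero =>
      intro n hn
      rw [PySem.List.pyRange_neg_one_eq_nil (by omega)]
      rfl
  | succ k ih =>
      intro n hn
      have hpos : (0 : Int) < n := by omega
      have hn' : n = (k : Int) + 1 := by omega
      rw [PySem.List.pyRange_neg_one_cons hpos]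
      show (if maxTruthCount pairs n = n then n else maxTruthLoop pairs (PySem.List.pyRange (n - 1) 0 (-1))) = _
      rw [count_eq_pvF pairs n (by omega), ih (n - 1) (by omega), hn']
      rfl

theorem scanB_inv (pairs : List (Int × Int)) :
    ∀ (k : Nat) (a : Int), 0 ≤ a →
      (((PySem.List.pyRange (a + 1) (a + (k : Int) + 1) 1).foldl (altScan (altDiff pairs))
          (pvF pairs a, pvScanT pairs a.toNat))).2 = pvScanT pairs (a + (k : Int)).toNat := by
  intro k
  induction k with
  | zero =>
      intro a ha
      rw [PySem.List.pyRange_one_eq_nil (by omega)]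
      simp
  | succ k ih =>
      intro a ha
      rw [PySem.List.pyRange_one_cons (by push_cast; omega)]
      simp only [List.foldl_cons]
      have hstep : altScan (altDiff pairs) (pvF pairs a, pvScanT pairs a.toNat) (a + 1)
          = (pvF pairs (a + 1), pvScanT pairs (a + 1).toNat) := by
        unfold altScan
        rw [altDiff_getD]
        have h1 : a + 1 - 1 = a := by omega
        have h2 : (a + 1).toNat = a.toNat + 1 := by omega
        rw [h1, h2]
        have h3 : ((a.toNat : Int) + 1) = a + 1 := by omega
        simp only [pvScanT, h3]
        rw [show pvF pairs a + (pvF pairs (a + 1) - pvF pairs a) = pvF pairs (a + 1) from by ring]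
      rw [hstep]
      have := ih (a + 1) (by omega)
      have harr : a + 1 + (k : Int) + 1 = a + ((k : Nat) + 1 : Nat) + 1 := by push_cast; omega
      have harr2 : (a + 1 + (k : Int)).toNat = (a + ((k : Nat) + 1 : Nat)).toNat := by push_cast; omega
      rw [harr, harr2] at this
      exact this

theorem altB_eq_scanT (pairs : List (Int × Int)) (n : Int) :
    max_truth_alt pairs n = pvScanT pairs (min n (pairs.length : Int)).toNat := by
  show ((PySem.List.pyRange 1 (min n (pairs.length : Int) + 1) 1).foldl (altScan (altDiff pairs))
          ((0 : Int), (-1 : Int))).2 = _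
  by_cases hm : min n (pairs.length : Int) ≤ 0
  · rw [PySem.List.pyRange_one_eq_nil (by omega)]
    have : (min n (pairs.length : Int)).toNat = 0 := by omega
    rw [this]
    rfl
  · have h0 : (0 : Int) ≤ min n (pairs.length : Int) := by omega
    have := scanB_inv pairs (min n (pairs.length : Int)).toNat 0 le_rfl
    have harr : (0 : Int) + ((min n (pairs.length : Int)).toNat : Int) + 1 = min n (pairs.length : Int) + 1 := by omega
    have harr2 : ((0 : Int) + ((min n (pairs.length : Int)).toNat : Int)).toNat = (min n (pairs.length : Int)).toNat := by omega
    rw [harr, harr2] at this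
    rw [pvF_zero] at this
    have h00 : (0 : Int).toNat = 0 := rfl
    rw [h00] at this
    exact this

theorem scanT_high (pairs : List (Int × Int)) :
    ∀ (j : Nat), pvScanT pairs (pairs.length + j) = pvScanT pairs pairs.length := by
  intro j
  induction j with
  | zero => rfl
  | succ j ih =>
      show pvScanT pairs ((pairs.length + j) + 1) = _
      simp only [pvScanT]
      have hFle := pvF_le_len pairs (((pairs.length + j : Nat) : Int) + 1)
      rw [if_neg (by push_cast at hFle ⊢; omega)]
      exact ih

-- ===== VERDICT (by name: the statement is the Claim_ definition above) =====
theorem max_truth_spec : Claim_equal_max_truth := by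
  intro pairs n _
  unfold Spec_max_truth
  rw [altB_eq_scanT]
  unfold max_truth
  rw [loopA_eq_scanT pairs n.toNat n rfl]
  by_cases h : n ≤ (pairs.length : Int)
  · have : (min n (pairs.length : Int)).toNat = n.toNat := by omega
    rw [this]
  · have hm : (min n (pairs.length : Int)).toNat = pairs.length := by omega
    rw [hm]
    have hn : n.toNat = pairs.length + (n.toNat - pairs.length) := by omega
    rw [hn, scanT_high]
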